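-- pv_equiv track=rewrite | github.com/thee-dushbag/code | live/projects/beaut.algos/wave_function_collapse.py | createtile_matrix
-- ===== SOURCE A (Python) =====
-- import typing as ty
--
-- @ty.final
-- class sides:
--     none: ty.Final[int] = 0
--     up: ty.Final[int] = 1
--     right: ty.Final[int] = 2
--     down: ty.Final[int] = 4
--     left: ty.Final[int] = 8
--
-- SIDES_MATRIX_IDX: ty.Final = {
--     1: sides.up,
--     5: sides.right,
--     7: sides.down,
--     3: sides.left,
-- }
--
-- def creatematrix(dim: tuple[int, int], init):
--     return [[init() for _ in range(dim[1])] for _ in range(dim[0])]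
--
-- def index2shape(shape: tuple[int, int]):
--     def shaper(index: int):
--         return index // shape[1], index % shape[1]
--
--     return shaper
--
-- def createtile_matrix(block: int, o=None, e=None):
--     # return CHAR_BLOCK.get(block, '▓')
--     empty, occupied = e or " ", o or "█"
--     if int(block) == -1:
--         return creatematrix((3, 3), lambda: "✸")
--     matrix = creatematrix((3, 3), lambda: empty)
--     if int(block) == sides.none:
--         return matrix
--     matrix[1][1] = occupied
--     shaper = index2shape((3, 3))
--
--     for index, side in SIDES_MATRIX_IDX.items():
--         if int(block) & side == side:
--             row, col = shaper(index)
--             matrix[row][col] = occupied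
--     return matrix
-- ===== SOURCE B (Python) =====
-- def createtile_matrix(block: int, o=None, e=None):
--     empty, occupied = e or " ", o or "█"
--     if int(block) == -1:
--         return [["✸"] * 3 for _ in range(3)]
--     if int(block) == 0:
--         return [[empty] * 3 for _ in range(3)]
--     up = occupied if int(block) & 1 == 1 else empty
--     right = occupied if int(block) & 2 == 2 else empty
--     down = occupied if int(block) & 4 == 4 else empty
--     left = occupied if int(block) & 8 == 8 else empty
--     return [
--         [empty, up, empty],
--         [left, occupied, right],
--         [empty, down, empty],
--     ]
-- ===== Notes on version B (the rewrite author's own statement) =====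
-- stated objective: simpler
-- what changed: B builds the 3x3 grid directly as a nested literal with the four edge cells chosen from the bit flags, removing the SIDES_MATRIX_IDX dict, the index2shape coordinate conversion and the creatematrix-then-mutate loop.
import Mathlib
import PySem

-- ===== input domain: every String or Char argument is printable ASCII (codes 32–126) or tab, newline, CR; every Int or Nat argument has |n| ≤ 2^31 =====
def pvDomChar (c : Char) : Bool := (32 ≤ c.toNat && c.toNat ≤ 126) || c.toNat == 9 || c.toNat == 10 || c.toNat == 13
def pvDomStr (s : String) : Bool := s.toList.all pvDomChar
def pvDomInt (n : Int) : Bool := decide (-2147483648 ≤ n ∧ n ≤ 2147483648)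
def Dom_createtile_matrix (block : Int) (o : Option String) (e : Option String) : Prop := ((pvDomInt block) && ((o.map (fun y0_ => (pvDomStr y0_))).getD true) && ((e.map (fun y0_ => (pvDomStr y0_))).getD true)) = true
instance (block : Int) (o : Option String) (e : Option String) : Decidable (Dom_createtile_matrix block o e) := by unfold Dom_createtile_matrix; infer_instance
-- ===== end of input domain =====

-- B builds the 3x3 grid directly as a nested literal from the four bit flags, replacing A's
-- dict-of-flat-indices + coordinate conversion + mutation loop (objective: simpler).

-- ===== PORT A =====
-- Python `x or default` on Optional[str]: None and "" are falsy.
def pvOrDefault (x : Option String) (d : String) : String :=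
  match x with
  | some s => if s ≠ "" then s else d
  | none => d

-- creatematrix(dim, init): nested list comprehension over range(dim[0]) × range(dim[1])
def pvCreatematrix (dim : Int × Int) (init : Unit → String) : List (List String) :=
  (List.range dim.1.toNat).map (fun _ => (List.range dim.2.toNat).map (fun _ => init ()))

-- index2shape((3,3)) shaper: index // shape[1], index % shape[1]
def pvShaper (shape : Int × Int) (index : Int) : Int × Int :=
  (PySem.Int.floordiv index shape.2, PySem.Int.mod index shape.2)

-- matrix[row][col] = v; every row/col A writes is a nonneg in-range literal, so .toNat/getD are exact here
def pvSet2 (m : List (List String)) (r c : Int) (v : String) : List (List String) :=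
  m.set r.toNat ((m.getD r.toNat []).set c.toNat v)

-- SIDES_MATRIX_IDX in insertion order
def pvSIDES : List (Int × Int) := [(1, 1), (5, 2), (7, 4), (3, 8)]

def createtile_matrix (block : Int) (o : Option String) (e : Option String) : List (List String) :=
  let empty := pvOrDefault e " "
  let occupied := pvOrDefault o "█"
  if block = -1 then pvCreatematrix (3, 3) (fun _ => "✸")
  else
    let matrix := pvCreatematrix (3, 3) (fun _ => empty)
    if block = 0 then matrix
    else
      let matrix := pvSet2 matrix 1 1 occupied
      pvSIDES.foldl (fun m p =>
        if PySem.Int.band block p.2 = p.2 then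
          let rc := pvShaper (3, 3) p.1
          pvSet2 m rc.1 rc.2 occupied
        else m) matrix

-- ===== PORT B =====
def createtile_matrix_alt (block : Int) (o : Option String) (e : Option String) : List (List String) :=
  let empty := pvOrDefault e " "
  let occupied := pvOrDefault o "█"
  if block = -1 then [["✸", "✸", "✸"], ["✸", "✸", "✸"], ["✸", "✸", "✸"]]
  else if block = 0 then [[empty, empty, empty], [empty, empty, empty], [empty, empty, empty]]
  else
    let up := if PySem.Int.band block 1 = 1 then occupied else empty
    let right := if PySem.Int.band block 2 = 2 then occupied else empty
    let down := if PySem.Int.band block 4 = 4 then occupied else empty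
    let left := if PySem.Int.band block 8 = 8 then occupied else empty
    [[empty, up, empty], [left, occupied, right], [empty, down, empty]]

-- ===== PRECONDITION & SPEC =====
def Spec_createtile_matrix (block : Int) (o : Option String) (e : Option String) (out : List (List String)) : Prop := out = createtile_matrix_alt block o e
instance (block : Int) (o : Option String) (e : Option String) (out : List (List String)) : Decidable (Spec_createtile_matrix block o e out) := by unfold Spec_createtile_matrix; infer_instance

-- ===== CLAIM (what is proved, stated in full; the proofs are below) =====
def Claim_equal_createtile_matrix : Prop := ∀ (block : Int) (o : Option String) (e : Option String), Dom_createtile_matrix block o e → Spec_createtile_matrix block o e (createtile_matrix block o e)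

-- ===== LEMMAS AND PROOFS =====

-- ===== VERDICT (by name: the statement is the Claim_ definition above) =====
theorem createtile_matrix_spec : Claim_equal_createtile_matrix := by
  intro block o e _
  unfold Spec_createtile_matrix createtile_matrix createtile_matrix_alt
  by_cases h1 : block = -1
  · simp [h1, pvCreatematrix, List.range_succ]
  · by_cases h0 : block = 0
    · simp [h0, pvCreatematrix, List.range_succ]
    · simp only [if_neg h1, if_neg h0]
      by_cases hu : PySem.Int.band block 1 = 1 <;>
      by_cases hr : PySem.Int.band block 2 = 2 <;>
      by_cases hd : PySem.Int.band block 4 = 4 <;>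
      by_cases hl : PySem.Int.band block 8 = 8 <;>
      simp [pvSIDES, pvCreatematrix, pvSet2, pvShaper, List.range_succ,
        PySem.Int.floordiv, PySem.Int.mod, hu, hr, hd, hl]
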